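-- pv_equiv track=rewrite | github.com/kolyanovna/MyMinor2015 | CON1/B.py | find
-- ===== SOURCE A (Python) =====
-- def find(arr):
--     flag = True
--     for i in range(len(arr)):
--         for j in range(i+1, len(arr)):
--             if (int(arr[i]) == -int(arr[j])):
--                 flag = False
--                 return i, j
--     return -1, -1
-- ===== SOURCE B (Python) =====
-- def find(arr):
--     # One pass: remember the first index of each value seen so far; at each j,
--     # the first occurrence of -arr[j] is the best partner i for this j.
--     first = {}
--     best = (-1, -1)
--     for j in range(len(arr)):
--         x = int(arr[j])
--         i = first.get(-x)
--         if i is not None and (best[0] == -1 or i < best[0]):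
--             best = (i, j)
--         if x not in first:
--             first[x] = j
--     return best
-- ===== Notes on version B (the rewrite author's own statement) =====
-- stated objective: faster
-- what changed: Replaced the nested quadratic scan over index pairs with a single pass that keeps a dict of each value's first index and a running best pair: at each j the best partner is the first occurrence of -arr[j].
import Mathlib
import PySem

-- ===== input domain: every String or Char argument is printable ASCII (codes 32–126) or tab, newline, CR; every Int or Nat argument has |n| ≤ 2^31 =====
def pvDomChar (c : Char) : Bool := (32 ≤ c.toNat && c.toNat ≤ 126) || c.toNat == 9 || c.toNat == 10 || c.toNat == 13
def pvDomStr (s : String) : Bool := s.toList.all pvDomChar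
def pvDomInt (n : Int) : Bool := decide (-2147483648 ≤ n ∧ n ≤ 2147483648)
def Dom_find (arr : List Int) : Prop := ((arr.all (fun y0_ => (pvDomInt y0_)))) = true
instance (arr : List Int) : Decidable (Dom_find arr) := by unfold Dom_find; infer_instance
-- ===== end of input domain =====

-- B replaces A's nested O(n^2) pair scan by one pass with a first-occurrence dict and a running best pair.

-- ===== PORT A =====
-- inner 'for j in range(i+1, len(arr)): if int(arr[i]) == -int(arr[j]): return i, j'
def findInner (arr : List Int) (i : Nat) : List Nat → Option (Int × Int)
  | [] => none
  | j :: js =>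
    if arr.getD i 0 = -(arr.getD j 0) then some ((i : Int), (j : Int))
    else findInner arr i js

-- outer 'for i in range(len(arr)): …; return -1, -1'  ('flag' is dead state in A)
def findOuter (arr : List Int) : List Nat → Int × Int
  | [] => (-1, -1)
  | i :: is =>
    match findInner arr i (List.range' (i + 1) (arr.length - (i + 1))) with
    | some p => p
    | none => findOuter arr is

def find (arr : List Int) : Int × Int :=
  findOuter arr (List.range arr.length)

-- ===== PORT B =====
-- 'for j in range(len(arr)): x = int(arr[j]); i = first.get(-x); if i is not None and (best[0] == -1 or i < best[0]): best = (i, j); if x not in first: first[x] = j'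
def findAltGo (arr : List Int) (first : PySem.Dict Int Int) (best : Int × Int) :
    List Nat → Int × Int
  | [] => best
  | j :: js =>
    let x := arr.getD j 0
    let best' :=
      match first.get? (-x) with
      | some i => if best.1 == -1 || i < best.1 then (i, (j : Int)) else best
      | none => best
    let first' := if first.contains x then first else first.insert x (j : Int)
    findAltGo arr first' best' js

def find_alt (arr : List Int) : Int × Int :=
  findAltGo arr PySem.Dict.empty (-1, -1) (List.range arr.length)

-- ===== PRECONDITION & SPEC =====
def Spec_find (arr : List Int) (out : Int × Int) : Prop := out = find_alt arr
instance (arr : List Int) (out : Int × Int) : Decidable (Spec_find arr out) := by unfold Spec_find; infer_instance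

-- ===== CLAIM (what is proved, stated in full; the proofs are below) =====
def Claim_equal_find : Prop := ∀ (arr : List Int), Dom_find arr → Spec_find arr (find arr)

-- ===== LEMMAS AND PROOFS =====

-- (i, j) is a valid pair with second index below m
def ValidU (arr : List Int) (m i j : Nat) : Prop :=
  i < j ∧ j < m ∧ arr.getD i 0 = -(arr.getD j 0)

-- o is the answer for pairs with second index below m: (-1,-1) if none, else the lex-least pair
def IsAns (arr : List Int) (m : Nat) (o : Int × Int) : Prop :=
  (o = (-1, -1) ∧ ∀ i j, ¬ ValidU arr m i j) ∨
  (∃ i j : Nat, o = ((i : Int), (j : Int)) ∧ ValidU arr m i j ∧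
    ∀ i' j', ValidU arr m i' j' → i ≤ i' ∧ (i' = i → j ≤ j'))

-- first-occurrence dict after scanning indices < m
def FirstInv (arr : List Int) (m : Nat) (d : PySem.Dict Int Int) : Prop :=
  ∀ v : Int,
    (d.get? v = none ∧ ∀ k < m, arr.getD k 0 ≠ v) ∨
    (∃ k : Nat, d.get? v = some (k : Int) ∧ k < m ∧ arr.getD k 0 = v ∧
      ∀ k' < k, arr.getD k' 0 ≠ v)

theorem isAns_unique (arr : List Int) (m : Nat) (o o' : Int × Int)
    (h : IsAns arr m o) (h' : IsAns arr m o') : o = o' := by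
  rcases h with ⟨ho, hno⟩ | ⟨i, j, ho, hv, hmin⟩
  · rcases h' with ⟨ho', _⟩ | ⟨i', j', ho', hv', _⟩
    · rw [ho, ho']
    · exact absurd hv' (hno i' j')
  · rcases h' with ⟨ho', hno'⟩ | ⟨i', j', ho', hv', hmin'⟩
    · exact absurd hv (hno' i j)
    · have h1 := hmin i' j' hv'
      have h2 := hmin' i j hv
      have hii : i = i' := le_antisymm h1.1 h2.1
      have hjj : j = j' := le_antisymm (h1.2 hii.symm) (h2.2 hii)
      rw [ho, ho', hii, hjj]

theorem inner_none (arr : List Int) (i : Nat) :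
    ∀ (b a : Nat), findInner arr i (List.range' a b) = none →
      ∀ j, a ≤ j → j < a + b → arr.getD i 0 ≠ -(arr.getD j 0) := by
  intro b
  induction b with
  | zero => intro a _ j h1 h2; omega
  | succ b ih =>
    intro a hnone j h1 h2
    rw [List.range'_succ] at hnone
    simp only [findInner] at hnone
    split at hnone
    · exact absurd hnone (by simp)
    · rcases Nat.eq_or_lt_of_le h1 with rfl | hlt
      · assumption
      · exact ih (a + 1) hnone j hlt (by omega)

theorem inner_some (arr : List Int) (i : Nat) :
    ∀ (b a : Nat) (o : Int × Int), findInner arr i (List.range' a b) = some o →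
      ∃ j : Nat, o = ((i : Int), (j : Int)) ∧ a ≤ j ∧ j < a + b ∧
        arr.getD i 0 = -(arr.getD j 0) ∧
        ∀ k, a ≤ k → k < j → arr.getD i 0 ≠ -(arr.getD k 0) := by
  intro b
  induction b with
  | zero => intro a o h; simp [findInner] at h
  | succ b ih =>
    intro a o hsome
    rw [List.range'_succ] at hsome
    simp only [findInner] at hsome
    split at hsome
    · refine ⟨a, by simpa using hsome.symm, le_refl a, by omega, by assumption, ?_⟩
      intro k h1 h2; omega
    · obtain ⟨j, ho, hj1, hj2, hm, hmin⟩ := ih (a + 1) o hsome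
      refine ⟨j, ho, by omega, by omega, hm, ?_⟩
      intro k hk1 hk2
      rcases Nat.eq_or_lt_of_le hk1 with rfl | hlt
      · assumption
      · exact hmin k hlt hk2

theorem outer_spec (arr : List Int) :
    ∀ (b a : Nat), a + b = arr.length →
      (∀ i j, i < a → ¬ ValidU arr arr.length i j) →
      IsAns arr arr.length (findOuter arr (List.range' a b)) := by
  intro b
  induction b with
  | zero =>
    intro a hab hno
    left
    refine ⟨rfl, ?_⟩
    intro i j hv
    have := hv.1; have := hv.2.1
    exact hno i j (by omega) hv
  | succ b ih =>
    intro a hab hno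
    rw [List.range'_succ]
    simp only [findOuter]
    cases hfi : findInner arr a (List.range' (a + 1) (arr.length - (a + 1))) with
    | none =>
      refine ih (a + 1) (by omega) ?_
      intro i j hi hv
      rcases Nat.lt_succ_iff_lt_or_eq.mp hi with h | rfl
      · exact hno i j h hv
      · obtain ⟨h1, h2, h3⟩ := hv
        exact inner_none arr i _ _ hfi j h1 (by omega) h3
    | some o =>
      obtain ⟨j, ho, hj1, hj2, hm, hmin⟩ := inner_some arr a _ _ o hfi
      right
      refine ⟨a, j, ho, ⟨hj1, by omega, hm⟩, ?_⟩
      intro i' j' hv'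
      obtain ⟨h1', h2', h3'⟩ := hv'
      have hai' : a ≤ i' := by
        by_contra h
        exact hno i' j' (by omega) ⟨h1', h2', h3'⟩
      refine ⟨hai', ?_⟩
      rintro rfl
      by_contra h
      exact hmin j' (by omega) (by omega) h3'

theorem validU_succ (arr : List Int) (m i j : Nat) :
    ValidU arr (m + 1) i j ↔
      ValidU arr m i j ∨ (i < m ∧ j = m ∧ arr.getD i 0 = -(arr.getD m 0)) := by
  unfold ValidU
  constructor
  · rintro ⟨h1, h2, h3⟩
    rcases Nat.lt_succ_iff_lt_or_eq.mp h2 with h | rfl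
    · exact Or.inl ⟨h1, h, h3⟩
    · exact Or.inr ⟨h1, rfl, h3⟩
  · rintro (⟨h1, h2, h3⟩ | ⟨h1, rfl, h3⟩)
    · exact ⟨h1, by omega, h3⟩
    · exact ⟨h1, by omega, h3⟩

theorem isAns_succ_no_new (arr : List Int) (m : Nat) (best : Int × Int)
    (h : IsAns arr m best)
    (hno : ∀ i, i < m → arr.getD i 0 ≠ -(arr.getD m 0)) : IsAns arr (m + 1) best := by
  rcases h with ⟨ho, hn⟩ | ⟨i, j, ho, hv, hmin⟩
  · left
    refine ⟨ho, ?_⟩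
    intro i j hv
    rcases (validU_succ arr m i j).mp hv with h | ⟨h1, rfl, h3⟩
    · exact hn i j h
    · exact hno i h1 h3
  · right
    refine ⟨i, j, ho, (validU_succ arr m i j).mpr (Or.inl hv), ?_⟩
    intro i' j' hv'
    rcases (validU_succ arr m i' j').mp hv' with h | ⟨h1, h2, h3⟩
    · exact hmin i' j' h
    · exact absurd h3 (hno i' h1)

theorem alt_go_spec (arr : List Int) :
    ∀ (b a : Nat) (first : PySem.Dict Int Int) (best : Int × Int),
      a + b = arr.length → FirstInv arr a first → IsAns arr a best →
      IsAns arr arr.length (findAltGo arr first best (List.range' a b)) := by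
  intro b
  induction b with
  | zero =>
    intro a first best hab _ hbest
    have ha : a = arr.length := by omega
    subst ha
    simpa [findAltGo] using hbest
  | succ b ih =>
    intro a first best hab hfirst hbest
    have hm : a < arr.length := by omega
    rw [List.range'_succ]
    simp only [findAltGo]
    apply ih (a + 1) _ _ (by omega)
    · -- FirstInv arr (a + 1) first'
      by_cases hc : first.contains (arr.getD a 0) = true
      · rw [if_pos hc]
        have hsome : (first.get? (arr.getD a 0)).isSome := by
          rw [← PySem.Dict.contains_eq_isSome_get?]; exact hc
        intro v
        rcases hfirst v with ⟨hn, hall⟩ | ⟨k, hgk, hk, hkv, hkmin⟩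
        · left
          refine ⟨hn, ?_⟩
          intro k hk
          rcases Nat.lt_succ_iff_lt_or_eq.mp hk with h | rfl
          · exact hall k h
          · intro hEq
            rw [hEq, hn] at hsome
            simp at hsome
        · exact Or.inr ⟨k, hgk, by omega, hkv, hkmin⟩
      · rw [if_neg hc]
        have hgx : first.get? (arr.getD a 0) = none := by
          have h1 : (first.get? (arr.getD a 0)).isSome = false := by
            rw [← PySem.Dict.contains_eq_isSome_get?]; simpa using hc
          cases hEq : first.get? (arr.getD a 0) with
          | none => rfl
          | some w => rw [hEq] at h1; simp at h1
        intro v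
        by_cases hv : v = arr.getD a 0
        · right
          refine ⟨a, ?_, Nat.lt_succ_self a, hv.symm, ?_⟩
          · rw [hv, PySem.Dict.get?_insert_self]
          · rcases hfirst (arr.getD a 0) with ⟨_, hall⟩ | ⟨k, hgk, _, _, _⟩
            · intro k' hk' hEq
              rw [hv] at hEq
              exact hall k' hk' hEq
            · rw [hgx] at hgk; simp at hgk
        · rw [PySem.Dict.get?_insert, if_neg hv]
          rcases hfirst v with ⟨hn, hall⟩ | ⟨k, hgk, hk, hkv, hkmin⟩
          · left
            refine ⟨hn, ?_⟩
            intro k hk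
            rcases Nat.lt_succ_iff_lt_or_eq.mp hk with h | rfl
            · exact hall k h
            · exact fun h => hv h.symm
          · exact Or.inr ⟨k, hgk, by omega, hkv, hkmin⟩
    · -- IsAns arr (a + 1) best'
      cases hg : first.get? (-(arr.getD a 0)) with
      | none =>
        apply isAns_succ_no_new _ _ _ hbest
        intro i hi hEq
        rcases hfirst (-(arr.getD a 0)) with ⟨_, hall⟩ | ⟨k, hgk, _, _, _⟩
        · exact hall i hi hEq
        · rw [hg] at hgk; simp at hgk
      | some i0 =>
        rcases hfirst (-(arr.getD a 0)) with ⟨hn, _⟩ | ⟨k0, hgk, hk0a, hk0v, hk0min⟩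
        · rw [hn] at hg; simp at hg
        · have hi0 : i0 = (k0 : Int) := by rw [hg] at hgk; injection hgk
          have hnew : ValidU arr (a + 1) k0 a := ⟨hk0a, Nat.lt_succ_self a, hk0v⟩
          have hleast : ∀ i', i' < a → arr.getD i' 0 = -(arr.getD a 0) → k0 ≤ i' := by
            intro i' h1 h2
            by_contra h
            exact hk0min i' (by omega) h2
          rcases hbest with ⟨ho, hno⟩ | ⟨bi, bj, hbo, hbv, hbmin⟩
          · simp only [hi0, ho]
            rw [if_pos (by simp)]
            right
            refine ⟨k0, a, rfl, hnew, ?_⟩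
            intro i' j' hv'
            rcases (validU_succ arr a i' j').mp hv' with h | ⟨h1, h2, h3⟩
            · exact absurd h (hno i' j')
            · exact ⟨hleast i' h1 h3, fun _ => by omega⟩
          · have hbj : bj < a := hbv.2.1
            simp only [hi0, hbo]
            by_cases hlt : k0 < bi
            · rw [if_pos (by simp; omega)]
              right
              refine ⟨k0, a, rfl, hnew, ?_⟩
              intro i' j' hv'
              rcases (validU_succ arr a i' j').mp hv' with h | ⟨h1, h2, h3⟩
              · have hb1 := (hbmin i' j' h).1
                exact ⟨by omega, fun hEq => by omega⟩
              · exact ⟨hleast i' h1 h3, fun _ => by omega⟩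
            · rw [if_neg (by simp; omega)]
              right
              refine ⟨bi, bj, rfl, (validU_succ arr a bi bj).mpr (Or.inl hbv), ?_⟩
              intro i' j' hv'
              rcases (validU_succ arr a i' j').mp hv' with h | ⟨h1, h2, h3⟩
              · exact hbmin i' j' h
              · have := hleast i' h1 h3
                exact ⟨by omega, fun _ => by omega⟩

-- ===== VERDICT (by name: the statement is the Claim_ definition above) =====
theorem find_spec : Claim_equal_find := by
  intro arr _
  unfold Spec_find
  have hA : IsAns arr arr.length (find arr) := by
    have := outer_spec arr arr.length 0 (by omega) (by intro i j hi hv; omega)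
    simpa [find, List.range_eq_range'] using this
  have hB : IsAns arr arr.length (find_alt arr) := by
    have := alt_go_spec arr arr.length 0 PySem.Dict.empty (-1, -1) (by omega)
      (by intro v; left; exact ⟨PySem.Dict.get?_empty v, by omega⟩)
      (by left; refine ⟨rfl, ?_⟩; intro i j hv; exact absurd hv.2.1 (by omega))
    simpa [find_alt, List.range_eq_range'] using this
  exact isAns_unique arr arr.length (find arr) (find_alt arr) hA hB
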